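-- pv_equiv track=rewrite | github.com/OneofGods/Loly | serie_a_real_algorithm.py | _get_stronger_real_serie_a_team
-- ===== SOURCE A (Python) =====
-- def _get_stronger_real_serie_a_team(home_team: str, away_team: str) -> str:
--     """Determine stronger team based on REAL Serie A hierarchy (2015-2025)"""
--     # Based on actual recent dominance and financial power
--     inter_tier = ['INTER', 'INTERNAZIONALE', 'INTER MILAN']    # Recent dominance
--     juventus_tier = ['JUVENTUS', 'JUVE']                       # Financial legacy
--     milan_tier = ['AC MILAN', 'MILAN']                         # Traditional power
--     strong_tier = ['NAPOLI', 'AS ROMA', 'ATALANTA', 'LAZIO']  # Competitive teams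
--
--     home_inter = any(team in home_team.upper() for team in inter_tier)
--     away_inter = any(team in away_team.upper() for team in inter_tier)
--     home_juve = any(team in home_team.upper() for team in juventus_tier)
--     away_juve = any(team in away_team.upper() for team in juventus_tier)
--     home_milan = any(team in home_team.upper() for team in milan_tier)
--     away_milan = any(team in away_team.upper() for team in milan_tier)
--     home_strong = any(team in home_team.upper() for team in strong_tier)
--     away_strong = any(team in away_team.upper() for team in strong_tier)
--
--     # Inter recent dominance (2 titles, CL final)
--     if home_inter and not (away_inter or away_juve):
--         return home_team
--     elif away_inter and not (home_inter or home_juve):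
--         return away_team
--     # Juventus financial power (despite recent struggles)
--     elif home_juve and not (away_inter or away_juve):
--         return home_team
--     elif away_juve and not (home_inter or home_juve):
--         return away_team
--     # Milan tier
--     elif home_milan and not (away_milan or away_inter or away_juve):
--         return home_team
--     elif away_milan and not (home_milan or home_inter or home_juve):
--         return away_team
--     # Strong teams
--     elif home_strong and not (away_strong or away_milan or away_inter or away_juve):
--         return home_team
--     elif away_strong and not (home_strong or home_milan or home_inter or home_juve):
--         return away_team
--     else:
--         # Similar level - Italian home advantage
--         return home_team
-- ===== SOURCE B (Python) =====
-- _TIERS = [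
--     (['INTER', 'INTERNAZIONALE', 'INTER MILAN', 'JUVENTUS', 'JUVE'], 3),
--     (['AC MILAN', 'MILAN'], 2),
--     (['NAPOLI', 'AS ROMA', 'ATALANTA', 'LAZIO'], 1),
-- ]
--
-- def _rank(name):
--     u = name.upper()
--     for names, r in _TIERS:
--         if any(t in u for t in names):
--             return r
--     return 0
--
-- def _get_stronger_real_serie_a_team(home_team: str, away_team: str) -> str:
--     return home_team if _rank(home_team) >= _rank(away_team) else away_team
-- ===== Notes on version B (the rewrite author's own statement) =====
-- stated objective: simpler
-- what changed: Replaced the eight-branch boolean cascade over eight substring flags by a rank table: each team gets a tier rank (3/2/1/0) in one pass over the tier lists, and the result is home if rank(home) >= rank(away) else away.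
import Mathlib
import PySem

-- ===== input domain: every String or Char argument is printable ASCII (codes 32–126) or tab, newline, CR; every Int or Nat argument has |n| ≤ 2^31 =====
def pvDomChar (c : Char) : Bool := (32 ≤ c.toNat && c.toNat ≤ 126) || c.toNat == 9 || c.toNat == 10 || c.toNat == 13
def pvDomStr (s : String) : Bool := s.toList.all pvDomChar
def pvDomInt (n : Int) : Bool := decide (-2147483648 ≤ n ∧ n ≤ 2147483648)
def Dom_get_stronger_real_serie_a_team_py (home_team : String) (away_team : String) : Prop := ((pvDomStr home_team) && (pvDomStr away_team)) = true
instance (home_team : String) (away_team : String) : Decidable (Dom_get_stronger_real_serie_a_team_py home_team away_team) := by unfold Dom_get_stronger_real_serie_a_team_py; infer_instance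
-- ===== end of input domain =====

-- B replaces A's eight-branch boolean cascade by a tier-rank table and a single comparison (objective: simpler).

-- ===== PORT A =====
-- any(team in s.upper() for team in tier)
def pvAnyIn (tier : List String) (s : String) : Bool :=
  tier.any (fun team => PySem.Str.isIn team (PySem.Str.upper s))

def get_stronger_real_serie_a_team_py (home_team : String) (away_team : String) : String :=
  let inter_tier := ["INTER", "INTERNAZIONALE", "INTER MILAN"]
  let juventus_tier := ["JUVENTUS", "JUVE"]
  let milan_tier := ["AC MILAN", "MILAN"]
  let strong_tier := ["NAPOLI", "AS ROMA", "ATALANTA", "LAZIO"]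
  let home_inter := pvAnyIn inter_tier home_team
  let away_inter := pvAnyIn inter_tier away_team
  let home_juve := pvAnyIn juventus_tier home_team
  let away_juve := pvAnyIn juventus_tier away_team
  let home_milan := pvAnyIn milan_tier home_team
  let away_milan := pvAnyIn milan_tier away_team
  let home_strong := pvAnyIn strong_tier home_team
  let away_strong := pvAnyIn strong_tier away_team
  if home_inter && !(away_inter || away_juve) then home_team
  else if away_inter && !(home_inter || home_juve) then away_team
  else if home_juve && !(away_inter || away_juve) then home_team
  else if away_juve && !(home_inter || home_juve) then away_team
  else if home_milan && !(away_milan || away_inter || away_juve) then home_team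
  else if away_milan && !(home_milan || home_inter || home_juve) then away_team
  else if home_strong && !(away_strong || away_milan || away_inter || away_juve) then home_team
  else if away_strong && !(home_strong || home_milan || home_inter || home_juve) then away_team
  else home_team

-- ===== PORT B =====
def pvTiers : List (List String × Int) :=
  [ (["INTER", "INTERNAZIONALE", "INTER MILAN", "JUVENTUS", "JUVE"], 3),
    (["AC MILAN", "MILAN"], 2),
    (["NAPOLI", "AS ROMA", "ATALANTA", "LAZIO"], 1) ]

-- the for-loop with early return in _rank
def pvRankGo (u : String) : List (List String × Int) → Int
  | [] => 0
  | (names, r) :: rest => if names.any (fun t => PySem.Str.isIn t u) then r else pvRankGo u rest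

def pvRank (name : String) : Int := pvRankGo (PySem.Str.upper name) pvTiers

def get_stronger_real_serie_a_team_py_alt (home_team : String) (away_team : String) : String :=
  if pvRank home_team ≥ pvRank away_team then home_team else away_team

-- ===== PRECONDITION & SPEC =====
def Spec_get_stronger_real_serie_a_team_py (home_team : String) (away_team : String) (out : String) : Prop := out = get_stronger_real_serie_a_team_py_alt home_team away_team
instance (home_team : String) (away_team : String) (out : String) : Decidable (Spec_get_stronger_real_serie_a_team_py home_team away_team out) := by unfold Spec_get_stronger_real_serie_a_team_py; infer_instance

-- ===== CLAIM (what is proved, stated in full; the proofs are below) =====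
def Claim_equal_get_stronger_real_serie_a_team_py : Prop := ∀ (home_team : String) (away_team : String), Dom_get_stronger_real_serie_a_team_py home_team away_team → Spec_get_stronger_real_serie_a_team_py home_team away_team (get_stronger_real_serie_a_team_py home_team away_team)

-- ===== LEMMAS AND PROOFS =====

-- B's rank, expressed through A's tier flags
theorem pvRank_eq (s : String) :
    pvRank s =
      (if pvAnyIn ["INTER", "INTERNAZIONALE", "INTER MILAN"] s || pvAnyIn ["JUVENTUS", "JUVE"] s then 3
       else if pvAnyIn ["AC MILAN", "MILAN"] s then 2
       else if pvAnyIn ["NAPOLI", "AS ROMA", "ATALANTA", "LAZIO"] s then 1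
       else 0) := by
  simp [pvRank, pvTiers, pvRankGo, pvAnyIn, Bool.or_assoc]

-- the eight-branch cascade equals the rank comparison, for arbitrary flags
theorem pv_cascade_eq (hi hj hm hs ai aj am as_ : Bool) (h a : String) :
    (if hi && !(ai || aj) then h
     else if ai && !(hi || hj) then a
     else if hj && !(ai || aj) then h
     else if aj && !(hi || hj) then a
     else if hm && !(am || ai || aj) then h
     else if am && !(hm || hi || hj) then a
     else if hs && !(as_ || am || ai || aj) then h
     else if as_ && !(hs || hm || hi || hj) then a
     else h) =
    (if (if hi || hj then (3 : Int) else if hm then 2 else if hs then 1 else 0) ≥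
        (if ai || aj then (3 : Int) else if am then 2 else if as_ then 1 else 0)
     then h else a) := by
  cases hi <;> cases hj <;> cases hm <;> cases hs <;>
    cases ai <;> cases aj <;> cases am <;> cases as_ <;> norm_num

-- ===== VERDICT (by name: the statement is the Claim_ definition above) =====
theorem get_stronger_real_serie_a_team_py_spec : Claim_equal_get_stronger_real_serie_a_team_py := by
  intro home_team away_team _
  unfold Spec_get_stronger_real_serie_a_team_py
  unfold get_stronger_real_serie_a_team_py get_stronger_real_serie_a_team_py_alt
  rw [pvRank_eq home_team, pvRank_eq away_team]
  exact pv_cascade_eq _ _ _ _ _ _ _ _ home_team away_team
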